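-- pv_equiv track=rewrite | github.com/lordzizzy/leet_code | 04_daily_challenge/week3_jan15_jan21/get_max_in_gen_array.py | genArray
-- ===== SOURCE A (Python) =====
-- from typing import List
--
-- def genArray(n: int) -> List[int]:
--     if n == 0:
--         return []
--     if n == 1:
--         return [0]
--
--     nums = [0] * (n+1)
--     nums[0], nums[1] = 0, 1
--
--     for i in range(2, len(nums)):
--         if i % 2:
--             #odd
--             nums[i] = nums[(i-1)//2] + nums[(i+1)//2]
--         else:
--             #even
--             nums[i] = nums[i//2]
--
--     return nums
-- ===== SOURCE B (Python) =====
-- from typing import List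
--
-- def genArray(n: int) -> List[int]:
--     if n == 0:
--         return []
--     if n == 1:
--         return [0]
--     memo = {0: 0, 1: 1}
--     def f(i: int) -> int:
--         if i in memo:
--             return memo[i]
--         v = f(i // 2) if i % 2 == 0 else f((i - 1) // 2) + f((i + 1) // 2)
--         memo[i] = v
--         return v
--     return [f(i) for i in range(n + 1)]
-- ===== Notes on version B (the rewrite author's own statement) =====
-- stated objective: alternative
-- what changed: Replaces A's forward-filled array DP (indexed reads into a preallocated list) with a top-down memoized recursion f(i) over the halving index structure, building the result as a comprehension.
import Mathlib
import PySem

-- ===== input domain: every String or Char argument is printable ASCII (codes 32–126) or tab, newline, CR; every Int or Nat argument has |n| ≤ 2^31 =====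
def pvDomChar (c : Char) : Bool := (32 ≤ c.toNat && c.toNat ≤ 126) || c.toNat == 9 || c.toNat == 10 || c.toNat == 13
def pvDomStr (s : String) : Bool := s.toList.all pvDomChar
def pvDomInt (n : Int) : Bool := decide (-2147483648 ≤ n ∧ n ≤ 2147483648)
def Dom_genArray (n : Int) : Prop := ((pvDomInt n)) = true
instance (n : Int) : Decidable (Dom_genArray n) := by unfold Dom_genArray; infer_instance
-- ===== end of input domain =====

-- B replaces A's forward-filled array DP with a top-down memoized recursion over the halving index structure (alternative decomposition, same cost).


-- ===== PORT A =====
-- literal port of A: preallocate [0]*(n+1), seed positions 0 and 1, fill forward by i in range(2, len(nums))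
def genArray (n : Int) : List Int :=
  if n == 0 then []
  else if n == 1 then [0]
  else
    let nums := List.replicate (n + 1).toNat (0 : Int)
    -- nums[0], nums[1] = 0, 1  (IndexError when the list is shorter: excluded by Pre_)
    let nums := PySem.List.pySetD (PySem.List.pySetD nums 0 0) 1 1
    (PySem.List.pyRange 2 (PySem.List.len nums) 1).foldl
      (fun nums i =>
        if PySem.Int.mod i 2 ≠ 0 then
          PySem.List.pySetD nums i
            (PySem.List.pyGetD nums (PySem.Int.floordiv (i - 1) 2) 0 +
             PySem.List.pyGetD nums (PySem.Int.floordiv (i + 1) 2) 0)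
        else
          PySem.List.pySetD nums i (PySem.List.pyGetD nums (PySem.Int.floordiv i 2) 0))
      nums

-- ===== PORT B =====
-- port of Source B's memoized f: the memo dict is threaded through the recursion; fuel = i.toNat is a
-- termination guard only (never exhausted, since the memo always contains 0 and 1)
def fAlt (fuel : Nat) (memo : PySem.Dict Int Int) (i : Int) : Int × PySem.Dict Int Int :=
  match memo.get? i with
  | some v => (v, memo)
  | none =>
    match fuel with
    | 0 => (0, memo)  -- unreachable fuel guard
    | fuel + 1 =>
      if PySem.Int.mod i 2 == 0 then
        let p := fAlt fuel memo (PySem.Int.floordiv i 2)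
        (p.1, p.2.insert i p.1)
      else
        let p1 := fAlt fuel memo (PySem.Int.floordiv (i - 1) 2)
        let p2 := fAlt fuel p1.2 (PySem.Int.floordiv (i + 1) 2)
        (p1.1 + p2.1, p2.2.insert i (p1.1 + p2.1))

def genArray_alt (n : Int) : List Int :=
  if n == 0 then []
  else if n == 1 then [0]
  else
    let memo0 := (PySem.Dict.empty.insert (0 : Int) (0 : Int)).insert 1 1
    ((PySem.List.pyRange 0 (n + 1) 1).foldl
      (fun (acc : List Int × PySem.Dict Int Int) i =>
        let p := fAlt i.toNat acc.2 i
        (acc.1 ++ [p.1], p.2))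
      ([], memo0)).1

-- ===== PRECONDITION & SPEC =====
-- A raises IndexError for negative n (the preallocated list is empty, so seeding its first cell fails)
def Pre_genArray (n : Int) : Prop := 0 ≤ n
instance (n : Int) : Decidable (Pre_genArray n) := by unfold Pre_genArray; infer_instance
def pvWitness_genArray : Int := 5

def Spec_genArray (n : Int) (out : List Int) : Prop := out = genArray_alt n
instance (n : Int) (out : List Int) : Decidable (Spec_genArray n out) := by unfold Spec_genArray; infer_instance

-- ===== CLAIM (what is proved, stated in full; the proofs are below) =====
def Claim_equal_genArray : Prop := ∀ (n : Int), Dom_genArray n → Pre_genArray n → Spec_genArray n (genArray n)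

-- ===== LEMMAS AND PROOFS =====

-- the common mathematical sequence both programs compute
def gSeq : Nat → Int
  | 0 => 0
  | 1 => 1
  | (i + 2) =>
    if (i + 2) % 2 == 0 then gSeq ((i + 2) / 2)
    else gSeq ((i + 1) / 2) + gSeq ((i + 3) / 2)
decreasing_by all_goals omega


-- gSeq's defining step for any index ≥ 2
theorem gSeq_two_le (m : Nat) (h : 2 ≤ m) :
    gSeq m = if m % 2 == 0 then gSeq (m / 2) else gSeq ((m - 1) / 2) + gSeq ((m + 1) / 2) := by
  obtain ⟨i, rfl⟩ : ∃ i, m = i + 2 := ⟨m - 2, by omega⟩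
  rw [gSeq]
  rfl

-- memo invariant for B's recursion: seeded with 0 and 1, every entry is a value of gSeq
def InvMemo (memo : PySem.Dict Int Int) : Prop :=
  memo.get? 0 = some 0 ∧ memo.get? 1 = some 1 ∧
    ∀ k v, memo.get? k = some v → 0 ≤ k ∧ v = gSeq k.toNat

theorem fAlt_correct : ∀ (fuel : Nat) (memo : PySem.Dict Int Int) (i : Int),
    InvMemo memo → 0 ≤ i → i.toNat ≤ fuel →
    (fAlt fuel memo i).1 = gSeq i.toNat ∧ InvMemo (fAlt fuel memo i).2 := by
  intro fuel
  induction fuel with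
  | zero =>
    intro memo i hinv hi hfuel
    have h0 : i = 0 := by omega
    subst h0
    rw [fAlt, hinv.1]
    refine ⟨?_, hinv⟩
    show (0 : Int) = gSeq (Int.toNat 0)
    norm_num [gSeq]
  | succ f ih =>
    intro memo i hinv hi hfuel
    rw [fAlt]
    cases hm : memo.get? i with
    | some v =>
      simp only
      obtain ⟨_, hv⟩ := (hinv.2.2) i v hm
      exact ⟨hv, hinv⟩
    | none =>
      have hne0 : i ≠ 0 := by intro h; rw [h, hinv.1] at hm; exact Option.some_ne_none _ hm
      have hne1 : i ≠ 1 := by intro h; rw [h, hinv.2.1] at hm; exact Option.some_ne_none _ hm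
      have h2 : 2 ≤ i := by omega
      obtain ⟨m, rfl⟩ : ∃ m : Nat, i = (m : Int) := ⟨i.toNat, by omega⟩
      have hm2 : 2 ≤ m := by exact_mod_cast h2
      have htwo : (2 : Int) = ((2 : Nat) : Int) := rfl
      have hmod : PySem.Int.mod (m : Int) 2 = ((m % 2 : Nat) : Int) := by
        rw [htwo]; exact PySem.Int.mod_natCast m 2
      have hins : ∀ (d : PySem.Dict Int Int) (v : Int),
          v = gSeq m → InvMemo d → InvMemo (d.insert (m : Int) v) := by
        intro d v hv hd
        refine ⟨?_, ?_, ?_⟩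
        · rw [PySem.Dict.get?_insert]
          simp only [if_neg (show (0 : Int) ≠ (m : Int) by omega)]
          exact hd.1
        · rw [PySem.Dict.get?_insert]
          simp only [if_neg (show (1 : Int) ≠ (m : Int) by omega)]
          exact hd.2.1
        · intro k w hk
          rw [PySem.Dict.get?_insert] at hk
          by_cases hkm : k = (m : Int)
          · rw [if_pos hkm] at hk
            refine ⟨by omega, ?_⟩
            cases hk
            rw [hv, hkm]
            simp
          · rw [if_neg hkm] at hk
            exact hd.2.2 k w hk
      by_cases hpar : m % 2 = 0
      · have hcond : (PySem.Int.mod (m : Int) 2 == 0) = true := by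
          rw [hmod, hpar]; rfl
        rw [if_pos hcond]
        have hdiv : PySem.Int.floordiv (m : Int) 2 = ((m / 2 : Nat) : Int) := by
          rw [htwo]; exact PySem.Int.floordiv_natCast m 2
        have hrec := ih memo ((m / 2 : Nat) : Int) hinv (by omega) (by omega)
        simp only [hdiv]
        refine ⟨?_, ?_⟩
        · simp only [hrec.1, Int.toNat_natCast]
          rw [gSeq_two_le m hm2, if_pos (by simp [hpar])]
        · apply hins
          · simp only [hrec.1, Int.toNat_natCast]
            rw [gSeq_two_le m hm2, if_pos (by simp [hpar])]
          · exact hrec.2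
      · have hcond : (PySem.Int.mod (m : Int) 2 == 0) = false := by
          rw [hmod]
          simp only [beq_eq_false_iff_ne, ne_eq]
          exact_mod_cast hpar
        have hcond' : ¬ ((PySem.Int.mod (m : Int) 2 == 0) = true) := by
          rw [hcond]; exact Bool.false_ne_true
        rw [if_neg hcond']
        have hd1 : (m : Int) - 1 = ((m - 1 : Nat) : Int) := by omega
        have hd2 : (m : Int) + 1 = ((m + 1 : Nat) : Int) := by omega
        have hdiv1 : PySem.Int.floordiv ((m : Int) - 1) 2 = (((m - 1) / 2 : Nat) : Int) := by
          rw [hd1, htwo]; exact PySem.Int.floordiv_natCast (m - 1) 2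
        have hdiv2 : PySem.Int.floordiv ((m : Int) + 1) 2 = (((m + 1) / 2 : Nat) : Int) := by
          rw [hd2, htwo]; exact PySem.Int.floordiv_natCast (m + 1) 2
        have hrec1 := ih memo (((m - 1) / 2 : Nat) : Int) hinv (by omega) (by omega)
        have hrec2 := ih (fAlt f memo (((m - 1) / 2 : Nat) : Int)).2 (((m + 1) / 2 : Nat) : Int)
          hrec1.2 (by omega) (by omega)
        simp only [hdiv1, hdiv2]
        have hval : (fAlt f memo (((m - 1) / 2 : Nat) : Int)).1 +
            (fAlt f (fAlt f memo (((m - 1) / 2 : Nat) : Int)).2 (((m + 1) / 2 : Nat) : Int)).1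
            = gSeq ((m : Int).toNat) := by
          rw [hrec1.1, hrec2.1, Int.toNat_natCast, Int.toNat_natCast, Int.toNat_natCast,
            gSeq_two_le m hm2, if_neg (by simp [hpar])]
        refine ⟨hval, ?_⟩
        apply hins
        · rw [hval]; simp
        · exact hrec2.2

-- the comprehension loop of B accumulates gSeq values
theorem b_fold : ∀ (l : Nat) (a b : Int) (acc : List Int) (memo : PySem.Dict Int Int),
    InvMemo memo → 0 ≤ a → (b - a).toNat = l →
    ((PySem.List.pyRange a b 1).foldl
      (fun (acc : List Int × PySem.Dict Int Int) i =>
        let p := fAlt i.toNat acc.2 i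
        (acc.1 ++ [p.1], p.2))
      (acc, memo)).1 = acc ++ (PySem.List.pyRange a b 1).map (fun i => gSeq i.toNat) := by
  intro l
  induction l with
  | zero =>
    intro a b acc memo hinv ha hl
    rw [PySem.List.pyRange_one_eq_nil (by omega)]
    simp
  | succ l ih =>
    intro a b acc memo hinv ha hl
    rw [PySem.List.pyRange_one_cons (by omega)]
    simp only [List.foldl_cons, List.map_cons]
    have hstep := fAlt_correct a.toNat memo a hinv ha (le_refl _)
    rw [ih (a + 1) b (acc ++ [(fAlt a.toNat memo a).1]) (fAlt a.toNat memo a).2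
      hstep.2 (by omega) (by omega)]
    rw [hstep.1]
    simp

theorem b_side (n : Int) (h : 2 ≤ n) :
    genArray_alt n = (List.range (n.toNat + 1)).map gSeq := by
  unfold genArray_alt
  rw [if_neg (by simp; omega), if_neg (by simp; omega)]
  have hinv0 : InvMemo ((PySem.Dict.empty.insert (0 : Int) (0 : Int)).insert 1 1) := by
    refine ⟨?_, ?_, ?_⟩
    · decide
    · decide
    · intro k v hk
      rw [PySem.Dict.get?_insert] at hk
      by_cases h1 : k = 1
      · rw [if_pos h1] at hk; cases hk; subst h1
        refine ⟨by omega, ?_⟩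
        show (1 : Int) = gSeq (Int.toNat 1)
        norm_num [gSeq]
      · rw [if_neg h1, PySem.Dict.get?_insert] at hk
        by_cases h0 : k = 0
        · rw [if_pos h0] at hk; cases hk; subst h0
          refine ⟨le_refl _, ?_⟩
          show (0 : Int) = gSeq (Int.toNat 0)
          norm_num [gSeq]
        · rw [if_neg h0] at hk
          rw [PySem.Dict.get?_empty] at hk
          exact absurd hk (Option.some_ne_none _).symm
  rw [b_fold (n + 1).toNat 0 (n + 1) [] _ hinv0 (le_refl _) (by omega)]
  rw [PySem.List.pyRange_one, List.map_map]
  simp only [List.nil_append, sub_zero]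
  have : (n + 1).toNat = n.toNat + 1 := by omega
  rw [this]
  apply List.map_congr_left
  intro k _
  simp

-- reading the filled prefix of A's array
theorem a_read (j N k : Nat) (hk : k < j) :
    PySem.List.pyGetD ((List.range j).map gSeq ++ List.replicate (N - j) (0 : Int)) (k : Int) 0
      = gSeq k := by
  rw [PySem.List.pyGetD_natCast, List.getD_eq_getElem?_getD,
    List.getElem?_append_left (by simpa using hk)]
  simp [List.getElem?_range hk]

-- writing at the frontier of A's array
theorem a_write (j N : Nat) (hj : j < N) (v : Int) :
    PySem.List.pySetD ((List.range j).map gSeq ++ List.replicate (N - j) (0 : Int)) (j : Int) v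
      = (List.range j).map gSeq ++ v :: List.replicate (N - (j + 1)) 0 := by
  rw [PySem.List.pySetD_natCast, List.set_append]
  rw [if_neg (by simp)]
  obtain ⟨r, hr⟩ : ∃ r, N - j = r + 1 := ⟨N - j - 1, by omega⟩
  rw [hr, List.replicate_succ]
  simp [show N - (j + 1) = r by omega]

-- A's fill loop maintains "prefix j holds gSeq, zeros beyond"
theorem a_loop : ∀ (l N j : Nat), 2 ≤ j → j + l = N →
    ((PySem.List.pyRange (j : Int) (N : Int) 1).foldl
      (fun nums i =>
        if PySem.Int.mod i 2 ≠ 0 then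
          PySem.List.pySetD nums i
            (PySem.List.pyGetD nums (PySem.Int.floordiv (i - 1) 2) 0 +
             PySem.List.pyGetD nums (PySem.Int.floordiv (i + 1) 2) 0)
        else
          PySem.List.pySetD nums i (PySem.List.pyGetD nums (PySem.Int.floordiv i 2) 0))
      ((List.range j).map gSeq ++ List.replicate (N - j) 0))
    = (List.range N).map gSeq := by
  intro l
  induction l with
  | zero =>
    intro N j h2 hN
    obtain rfl : j = N := by omega
    rw [PySem.List.pyRange_one_eq_nil (le_refl _)]
    simp
  | succ l ih =>
    intro N j h2 hN
    have hjN : j < N := by omega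
    rw [PySem.List.pyRange_one_cons (by exact_mod_cast hjN)]
    rw [List.foldl_cons]
    have htwo : (2 : Int) = ((2 : Nat) : Int) := rfl
    have hmod : PySem.Int.mod (j : Int) 2 = ((j % 2 : Nat) : Int) := by
      rw [htwo]; exact PySem.Int.mod_natCast j 2
    have hstep :
        (if PySem.Int.mod (j : Int) 2 ≠ 0 then
          PySem.List.pySetD ((List.range j).map gSeq ++ List.replicate (N - j) 0) (j : Int)
            (PySem.List.pyGetD ((List.range j).map gSeq ++ List.replicate (N - j) 0)
              (PySem.Int.floordiv ((j : Int) - 1) 2) 0 +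
             PySem.List.pyGetD ((List.range j).map gSeq ++ List.replicate (N - j) 0)
              (PySem.Int.floordiv ((j : Int) + 1) 2) 0)
        else
          PySem.List.pySetD ((List.range j).map gSeq ++ List.replicate (N - j) 0) (j : Int)
            (PySem.List.pyGetD ((List.range j).map gSeq ++ List.replicate (N - j) 0)
              (PySem.Int.floordiv (j : Int) 2) 0))
        = (List.range (j + 1)).map gSeq ++ List.replicate (N - (j + 1)) 0 := by
      have hout : (List.range j).map gSeq ++ gSeq j :: List.replicate (N - (j + 1)) (0 : Int)
          = (List.range (j + 1)).map gSeq ++ List.replicate (N - (j + 1)) 0 := by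
        rw [List.range_succ, List.map_append]
        simp
      by_cases hpar : j % 2 = 0
      · rw [if_neg (by rw [hmod, hpar]; simp)]
        have hdiv : PySem.Int.floordiv (j : Int) 2 = ((j / 2 : Nat) : Int) := by
          rw [htwo]; exact PySem.Int.floordiv_natCast j 2
        rw [hdiv, a_read j N (j / 2) (by omega), a_write j N hjN]
        rw [gSeq_two_le j h2, if_pos (by simp [hpar])] at hout
        exact hout
      · rw [if_pos (by rw [hmod]; simp; omega)]
        have hd1 : (j : Int) - 1 = ((j - 1 : Nat) : Int) := by omega
        have hd2 : (j : Int) + 1 = ((j + 1 : Nat) : Int) := by omega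
        have hdiv1 : PySem.Int.floordiv ((j : Int) - 1) 2 = (((j - 1) / 2 : Nat) : Int) := by
          rw [hd1, htwo]; exact PySem.Int.floordiv_natCast (j - 1) 2
        have hdiv2 : PySem.Int.floordiv ((j : Int) + 1) 2 = (((j + 1) / 2 : Nat) : Int) := by
          rw [hd2, htwo]; exact PySem.Int.floordiv_natCast (j + 1) 2
        rw [hdiv1, hdiv2, a_read j N ((j - 1) / 2) (by omega), a_read j N ((j + 1) / 2) (by omega),
          a_write j N hjN]
        rw [gSeq_two_le j h2, if_neg (by simp [hpar])] at hout
        exact hout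
    rw [hstep]
    have := ih N (j + 1) (by omega) (by omega)
    exact_mod_cast this

theorem a_side (n : Int) (h : 2 ≤ n) :
    genArray n = (List.range (n.toNat + 1)).map gSeq := by
  unfold genArray
  rw [if_neg (by simp; omega), if_neg (by simp; omega)]
  simp only []
  have hN : (n + 1).toNat = n.toNat + 1 := by omega
  obtain ⟨K, hK⟩ : ∃ K, n.toNat + 1 = K + 3 := ⟨n.toNat - 2, by omega⟩
  have hinit :
      PySem.List.pySetD (PySem.List.pySetD (List.replicate (n + 1).toNat (0 : Int)) 0 0) 1 1
        = (List.range 2).map gSeq ++ List.replicate (n.toNat + 1 - 2) 0 := by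
    rw [PySem.List.pySetD_of_nonneg _ _ (by norm_num : (0 : Int) ≤ 1),
      PySem.List.pySetD_of_nonneg _ _ (by norm_num : (0 : Int) ≤ 0), hN, hK]
    simp [List.replicate_succ, List.range_succ, gSeq, show K + 3 - 2 = K + 1 by omega]
  rw [hinit]
  have hlen : PySem.List.len
      ((List.range 2).map gSeq ++ List.replicate (n.toNat + 1 - 2) (0 : Int))
      = ((n.toNat + 1 : Nat) : Int) := by
    simp [PySem.List.len_eq]
    omega
  rw [hlen]
  have := a_loop (n.toNat + 1 - 2) (n.toNat + 1) 2 (le_refl _) (by omega)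
  exact_mod_cast this

-- ===== VERDICT (by name: the statement is the Claim_ definition above) =====
theorem genArray_spec : Claim_equal_genArray := by
  intro n _ hpre
  unfold Spec_genArray
  by_cases h0 : n = 0
  · subst h0; decide
  · by_cases h1 : n = 1
    · subst h1; decide
    · have h2 : 2 ≤ n := by unfold Pre_genArray at hpre; omega
      rw [a_side n h2, b_side n h2]
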